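-- pv_equiv track=rewrite | github.com/hsnksc/scraper-service | scraper/google_search.py | _location_variants
-- ===== SOURCE A (Python) =====
-- def _location_variants(geo: dict) -> list[str]:
--     variants: list[str] = []
--
--     if geo.get("road"):
--         parts = [geo["road"], geo.get("neighborhood", ""), geo.get("district", ""), geo.get("city", "")]
--         variants.append(" ".join(part for part in parts if part))
--
--     for keys in [
--         ("neighborhood", "district", "city"),
--         ("district", "city"),
--         ("county", "city"),
--         ("city",),
--     ]:
--         parts = [geo.get(key, "") for key in keys]
--         variant = " ".join(part for part in parts if part)
--         if variant:
--             variants.append(variant)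
--
--     deduped: list[str] = []
--     seen: set[str] = set()
--     for variant in variants:
--         normalized = " ".join(variant.split())
--         if normalized and normalized not in seen:
--             deduped.append(normalized)
--             seen.add(normalized)
--     return deduped
-- ===== SOURCE B (Python) =====
-- def _location_variants(geo: dict) -> list[str]:
--     # Token-level recursion: pre-split every relevant value into its word list once,
--     # then recurse over the combo list concatenating word lists; joining words with a
--     # single space IS the normalization, and dedup is membership in the output built so far.
--     words = {k: geo.get(k, "").split()
--              for k in ("road", "neighborhood", "district", "city", "county")}
--     combos = [("road", "neighborhood", "district", "city"),
--               ("neighborhood", "district", "city"),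
--               ("district", "city"),
--               ("county", "city"),
--               ("city",)]
--
--     def build(i: int, out: list[str]) -> list[str]:
--         if i == len(combos):
--             return out
--         toks = [w for k in combos[i] for w in words[k]]
--         s = " ".join(toks)
--         if toks and s not in out:
--             out = out + [s]
--         return build(i + 1, out)
--
--     return build(0, [])
-- ===== Notes on version B (the rewrite author's own statement) =====
-- stated objective: alternative
-- what changed: B works at the token level: every relevant value is pre-split into its word list once, a recursion over the combo list concatenates word lists per combo (so joining with single spaces IS the normalization and A's separate split-and-rejoin dedup pass disappears), and duplicates are detected by membership in the output list built so far instead of an auxiliary seen set; A's conditional road branch is subsumed by an unconditional first combo whose empty-road case collapses onto the next combo and is removed by dedup.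
import Mathlib
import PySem

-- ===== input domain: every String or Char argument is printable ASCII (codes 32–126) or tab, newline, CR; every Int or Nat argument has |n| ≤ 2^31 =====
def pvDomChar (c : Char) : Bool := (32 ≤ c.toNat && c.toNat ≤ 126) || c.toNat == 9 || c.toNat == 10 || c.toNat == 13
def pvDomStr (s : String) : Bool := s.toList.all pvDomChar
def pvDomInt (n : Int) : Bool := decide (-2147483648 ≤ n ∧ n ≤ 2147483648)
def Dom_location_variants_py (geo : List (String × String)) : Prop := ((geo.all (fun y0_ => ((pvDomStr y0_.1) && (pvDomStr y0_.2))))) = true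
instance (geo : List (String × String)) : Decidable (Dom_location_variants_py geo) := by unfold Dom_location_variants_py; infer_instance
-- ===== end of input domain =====

-- B replaces A's three string-level phases by a token-level recursion (values pre-split
-- into word lists, combos concatenated and deduped against the output built so far);
-- same return value, objective: alternative.

-- ===== PORT A =====
-- geo.get(k, "") — first-match association-list lookup; also models the truthiness test
-- 'if geo.get("road")' since both None (missing) and "" are falsy and map to "".
def pvGetA (geo : List (String × String)) (k : String) : String :=
  PySem.Dict.getD (PySem.Dict.mk geo) k ""

-- " ".join(part for part in parts if part)
def pvJoinNonemptyA (parts : List String) : String :=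
  PySem.Str.join " " (parts.filter (fun p => p ≠ ""))

-- body of A's dedup loop: normalized = " ".join(variant.split()); append if nonempty and unseen
def pvDedupStepA (st : List String × PySem.Set String) (variant : String) :
    List String × PySem.Set String :=
  let normalized := PySem.Str.join " " (PySem.Str.split₀ variant)
  if normalized ≠ "" ∧ normalized ∉ st.2 then
    (st.1 ++ [normalized], PySem.Set.add st.2 normalized)
  else st

def location_variants_py (geo : List (String × String)) : List String :=
  let variants : List String :=
    if pvGetA geo "road" ≠ "" then
      [pvJoinNonemptyA [pvGetA geo "road", pvGetA geo "neighborhood",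
                        pvGetA geo "district", pvGetA geo "city"]]
    else []
  let variants :=
    ([["neighborhood", "district", "city"], ["district", "city"],
      ["county", "city"], ["city"]]).foldl
      (fun acc ks =>
        let variant := pvJoinNonemptyA (ks.map (pvGetA geo))
        if variant ≠ "" then acc ++ [variant] else acc) variants
  (variants.foldl pvDedupStepA ([], PySem.Set.empty)).1

-- ===== PORT B =====
-- words = {k: geo.get(k, "").split() for k in (...)} — the pre-split word list of key k
def pvWordsB (geo : List (String × String)) (k : String) : List String :=
  PySem.Str.split₀ (PySem.Dict.getD (PySem.Dict.mk geo) k "")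

def pvCombosB : List (List String) :=
  [["road", "neighborhood", "district", "city"],
   ["neighborhood", "district", "city"],
   ["district", "city"],
   ["county", "city"],
   ["city"]]

-- def build(i, out): recursion over the remaining combos carrying the output built so far
def pvBuildB (geo : List (String × String)) : List (List String) → List String → List String
  | [], out => out
  | ks :: rest, out =>
    let toks := ks.flatMap (pvWordsB geo)
    let s := PySem.Str.join " " toks
    pvBuildB geo rest (if toks ≠ [] ∧ s ∉ out then out ++ [s] else out)

def location_variants_py_alt (geo : List (String × String)) : List String :=
  pvBuildB geo pvCombosB []

-- ===== PRECONDITION & SPEC =====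
def Spec_location_variants_py (geo : List (String × String)) (out : List String) : Prop := out = location_variants_py_alt geo
instance (geo : List (String × String)) (out : List String) : Decidable (Spec_location_variants_py geo out) := by unfold Spec_location_variants_py; infer_instance

-- ===== CLAIM (what is proved, stated in full; the proofs are below) =====
def Claim_equal_location_variants_py : Prop := ∀ (geo : List (String × String)), Dom_location_variants_py geo → Spec_location_variants_py geo (location_variants_py geo)

-- ===== LEMMAS AND PROOFS =====

-- normalization " ".join(s.split()) as one function on strings
def pvNormStr (s : String) : String :=
  PySem.Str.join " " (PySem.Str.split₀ s)

-- the normalized variant a key tuple produces, as a function of the looked-up parts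
def pvN (ps : List String) : String :=
  String.ofList (PySem.Chars.join [' '] ((ps.map String.toList).flatMap PySem.Chars.split₀))

-- A's dedup step applied to an already-normalized string
def pvStep (st : List String × PySem.Set String) (n : String) :
    List String × PySem.Set String :=
  if n ≠ "" ∧ n ∉ st.2 then (st.1 ++ [n], PySem.Set.add st.2 n) else st

-- the same step with the state collapsed to the output list alone
def pvStepN (out : List String) (n : String) : List String :=
  if n ≠ "" ∧ n ∉ out then out ++ [n] else out

-- pvStepN with the nonemptiness test already discharged
def pvStep2N (out : List String) (n : String) : List String :=
  if n ∉ out then out ++ [n] else out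

theorem pvIsspace_space : PySem.Chars.isspace ' ' = true := by decide

theorem pvGo_acc (s cur acc) :
    PySem.Chars.split₀.go s cur acc = acc.reverse ++ PySem.Chars.split₀.go s cur [] := by
  induction s generalizing cur acc with
  | nil => by_cases h : cur.isEmpty <;> simp [PySem.Chars.split₀.go, h]
  | cons c rest ih =>
    by_cases h : PySem.Chars.isspace c
    · by_cases h2 : cur.isEmpty <;>
        simp [PySem.Chars.split₀.go, h, h2, ih ([]) acc, ih ([]) (cur.reverse :: acc),
          ih ([]) [cur.reverse]]
    · simp [PySem.Chars.split₀.go, h, ih (c :: cur) acc]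

theorem pvGo_space (a b : List Char) (cur) :
    PySem.Chars.split₀.go (a ++ ' ' :: b) cur [] =
      PySem.Chars.split₀.go a cur [] ++ PySem.Chars.split₀.go b [] [] := by
  induction a generalizing cur with
  | nil =>
    by_cases h : cur.isEmpty <;>
      simp [PySem.Chars.split₀.go, pvIsspace_space, h, pvGo_acc b [] [cur.reverse]]
  | cons c rest ih =>
    by_cases h : PySem.Chars.isspace c
    · by_cases h2 : cur.isEmpty <;>
        simp [PySem.Chars.split₀.go, h, h2, ih ([]),
          pvGo_acc rest ([]) [cur.reverse], pvGo_acc (rest ++ ' ' :: b) ([]) [cur.reverse]]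
    · simp [PySem.Chars.split₀.go, h, ih (c :: cur)]

theorem pvSplit_append_space (a b : List Char) :
    PySem.Chars.split₀ (a ++ ' ' :: b) = PySem.Chars.split₀ a ++ PySem.Chars.split₀ b := by
  simp [PySem.Chars.split₀, pvGo_space a b []]

theorem pvSplit_join (ps : List (List Char)) :
    PySem.Chars.split₀ (PySem.Chars.join [' '] ps) = ps.flatMap PySem.Chars.split₀ := by
  induction ps with
  | nil => rfl
  | cons p rest ih =>
    cases rest with
    | nil => simp [PySem.Chars.join, List.intercalate]
    | cons q r =>
      have : PySem.Chars.join [' '] (p :: q :: r) = p ++ ' ' :: PySem.Chars.join [' '] (q :: r) := by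
        simp [PySem.Chars.join, List.intercalate]
      rw [this, pvSplit_append_space, ih]
      simp

theorem pvNorm_join (ps : List String) :
    pvNormStr (PySem.Str.join " " ps) = pvN ps := by
  simp only [pvNormStr, pvN, PySem.Str.join, PySem.Str.split₀, String.toList_ofList,
    List.map_map, (by decide : (" " : String).toList = [' '])]
  rw [pvSplit_join]
  congr 1
  simp [Function.comp_def]

theorem pvFlatMap_filter (ps : List String) :
    ((ps.filter (fun p => p ≠ "")).map String.toList).flatMap PySem.Chars.split₀ =
      (ps.map String.toList).flatMap PySem.Chars.split₀ := by
  induction ps with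
  | nil => rfl
  | cons p rest ih =>
    by_cases h : p = ""
    · subst h; simpa using ih
    · simp [h]; simpa using ih

theorem pvNorm_joinNonempty (ps : List String) :
    pvNormStr (pvJoinNonemptyA ps) = pvN ps := by
  rw [pvJoinNonemptyA, pvNorm_join]
  simp only [pvN, pvFlatMap_filter]

theorem pvN_empty_head (ps : List String) : pvN ("" :: ps) = pvN ps := rfl

theorem pvNorm_empty : pvNormStr "" = "" := rfl

-- every word produced by split₀ is nonempty
theorem pvSplitGo_ne (s : List Char) (cur : List Char) (acc : List (List Char))
    (hacc : ∀ w ∈ acc, w ≠ []) (hcur : cur ≠ [] → cur.reverse ≠ []) :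
    ∀ w ∈ PySem.Chars.split₀.go s cur acc, w ≠ [] := by
  induction s generalizing cur acc with
  | nil =>
    by_cases h : cur.isEmpty
    · simpa [PySem.Chars.split₀.go, h] using fun w hw => hacc w (by simpa using hw)
    · intro w hw
      simp [PySem.Chars.split₀.go, h] at hw
      rcases hw with hw | hw
      · exact hacc w (by simpa using hw)
      · subst hw
        exact hcur (by simpa [List.isEmpty_iff] using h)
  | cons c rest ih =>
    by_cases h : PySem.Chars.isspace c
    · by_cases h2 : cur.isEmpty
      · simpa [PySem.Chars.split₀.go, h, h2] using ih ([]) acc hacc (by simp)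
      · refine fun w hw => ?_
        have := ih ([]) (cur.reverse :: acc) ?_ (by simp)
        · exact this w (by simpa [PySem.Chars.split₀.go, h, h2] using hw)
        · intro v hv
          rcases List.mem_cons.1 hv with hv | hv
          · subst hv
            simpa using (by simpa [List.isEmpty_iff] using h2 : cur ≠ [])
          · exact hacc v hv
    · simpa [PySem.Chars.split₀.go, h] using ih (c :: cur) acc hacc (by simp)

theorem pvSplit_words_ne (l : List Char) : ∀ w ∈ PySem.Chars.split₀ l, w ≠ [] :=
  pvSplitGo_ne l [] [] (by simp) (by simp)

theorem pvStepN_eq_ite (out n) :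
    pvStepN out n = if n ≠ "" then pvStep2N out n else out := by
  by_cases h : n = "" <;> simp [pvStepN, pvStep2N, h]

theorem pvFoldl_stepN_filter (l : List String) (out) :
    l.foldl pvStepN out = (l.filter (fun n => n ≠ "")).foldl pvStep2N out := by
  rw [show pvStepN = (fun out n => if n ≠ "" then pvStep2N out n else out) from
        funext fun out => funext fun n => pvStepN_eq_ite out n]
  exact PySem.List.foldl_ite_eq_foldl_filter _ _ _ _

theorem pvStep2N_idem (out x) : pvStep2N (pvStep2N out x) x = pvStep2N out x := by
  by_cases h : x ∈ out
  · simp [pvStep2N, h]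
  · simp [pvStep2N, h]

-- collapsing A's (list, set) state: whenever the set mirrors the list, only the list matters
theorem pvFoldl_step_collapse (l : List String) (st : List String × PySem.Set String)
    (hinv : ∀ x, x ∈ st.2 ↔ x ∈ st.1) :
    (l.foldl pvStep st).1 = l.foldl pvStepN st.1 := by
  induction l generalizing st with
  | nil => rfl
  | cons n rest ih =>
    simp only [List.foldl_cons]
    by_cases h : n ≠ "" ∧ n ∉ st.2
    · have h' : n ≠ "" ∧ n ∉ st.1 := ⟨h.1, fun hm => h.2 ((hinv n).2 hm)⟩
      rw [show pvStep st n = (st.1 ++ [n], PySem.Set.add st.2 n) by simp [pvStep, h],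
          show pvStepN st.1 n = st.1 ++ [n] by simp [pvStepN, h'.1, h'.2]]
      exact ih _ (fun x => by
        simp [PySem.Set.mem_add, hinv x, or_comm])
    · have h' : ¬(n ≠ "" ∧ n ∉ st.1) := by
        intro hc
        exact h ⟨hc.1, fun hm => hc.2 ((hinv n).1 hm)⟩
      rw [show pvStep st n = st by simp only [pvStep]; rw [if_neg h],
          show pvStepN st.1 n = st.1 by simp only [pvStepN]; rw [if_neg h']]
      exact ih st hinv

-- the per-tuple normalized variant, as a function of the key tuple
def pvW (geo : List (String × String)) (ks : List String) : String :=
  pvN (ks.map (pvGetA geo))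

-- the four unconditional key tuples of A's loop
def pvTs4 : List (List String) :=
  [["neighborhood", "district", "city"], ["district", "city"], ["county", "city"], ["city"]]

-- B's per-combo joined string is exactly the normalized variant pvW
theorem pvS_eq (geo : List (String × String)) (ks : List String) :
    PySem.Str.join " " (ks.flatMap (pvWordsB geo)) = pvW geo ks := by
  simp only [pvWordsB, pvW, pvN, PySem.Str.join, PySem.Str.split₀,
    (by decide : (" " : String).toList = [' '])]
  congr 1
  congr 1
  simp only [List.map_flatMap, List.flatMap_map, Function.comp_def]
  exact List.flatMap_congr (fun k _ => by
    simp [pvWordsB, pvGetA, PySem.Str.split₀_map_toList])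

-- B's emptiness test on the token list agrees with the string-emptiness test on pvW
theorem pvToks_ne_iff (geo : List (String × String)) (ks : List String) :
    (ks.flatMap (pvWordsB geo) ≠ []) ↔ pvW geo ks ≠ "" := by
  rw [← pvS_eq]
  constructor
  · intro h hs
    cases htoks : ks.flatMap (pvWordsB geo) with
    | nil => exact h htoks
    | cons w rest =>
      have hw : w.toList ≠ [] := by
        have hmem : w.toList ∈ (ks.flatMap (pvWordsB geo)).map String.toList := by
          rw [htoks]; simp
        have : (ks.flatMap (pvWordsB geo)).map String.toList =
            ks.flatMap (fun k => PySem.Chars.split₀ (pvGetA geo k).toList) := by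
          simp [pvWordsB, PySem.Str.split₀, List.map_flatMap, List.flatMap_map,
            List.map_map, Function.comp_def, pvGetA]
        rw [this] at hmem
        rcases List.mem_flatMap.1 hmem with ⟨k, _, hk⟩
        exact pvSplit_words_ne _ _ hk
      have : (PySem.Str.join " " (ks.flatMap (pvWordsB geo))).toList = [] := by
        rw [hs]; rfl
      rw [PySem.Str.toList_join, htoks] at this
      cases rest with
      | nil => exact hw (by simpa [PySem.Chars.join, List.intercalate] using this)
      | cons q r =>
        have : (w.toList ++ ' ' :: PySem.Chars.join [' '] ((q :: r).map String.toList)) = [] := by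
          simpa [PySem.Chars.join, List.intercalate] using this
        simp at this
  · intro h htoks
    rw [htoks] at h
    exact h (by rfl)

-- unrolling B's recursion into a fold of pvStepN over the pvW strings
theorem pvBuildB_eq (geo : List (String × String)) (ts : List (List String)) (out : List String) :
    pvBuildB geo ts out = (ts.map (pvW geo)).foldl pvStepN out := by
  induction ts generalizing out with
  | nil => rfl
  | cons ks rest ih =>
    simp only [pvBuildB, List.map_cons, List.foldl_cons]
    rw [show (if ks.flatMap (pvWordsB geo) ≠ [] ∧ PySem.Str.join " " (ks.flatMap (pvWordsB geo)) ∉ out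
            then out ++ [PySem.Str.join " " (ks.flatMap (pvWordsB geo))] else out) =
          pvStepN out (pvW geo ks) by
        simp only [pvStepN, pvS_eq, pvToks_ne_iff]]
    exact ih _

theorem pvB_eq (geo : List (String × String)) :
    location_variants_py_alt geo = (pvCombosB.map (pvW geo)).foldl pvStepN [] := by
  exact pvBuildB_eq geo pvCombosB []

theorem pvA_eq (geo : List (String × String)) :
    location_variants_py geo =
      (((if pvGetA geo "road" ≠ "" then
            [pvW geo ["road", "neighborhood", "district", "city"]] else []) ++
        (pvTs4.filter
            (fun ks => decide (pvJoinNonemptyA (ks.map (pvGetA geo)) ≠ ""))).map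
          (pvW geo)).foldl pvStep ([], PySem.Set.empty)).1 := by
  simp only [location_variants_py]
  rw [← show pvTs4 = [["neighborhood", "district", "city"], ["district", "city"],
        ["county", "city"], ["city"]] from rfl]
  have h4 := PySem.List.foldl_append_ite
      (fun ks => pvJoinNonemptyA (List.map (pvGetA geo) ks) ≠ "")
      (fun ks => pvJoinNonemptyA (List.map (pvGetA geo) ks)) pvTs4
      (if pvGetA geo "road" ≠ "" then
        [pvJoinNonemptyA [pvGetA geo "road", pvGetA geo "neighborhood",
                          pvGetA geo "district", pvGetA geo "city"]]
      else [])
  rw [h4]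
  rw [show pvDedupStepA = fun st v => pvStep st (pvNormStr v) from rfl]
  rw [← List.foldl_map]
  refine congrArg Prod.fst (congrArg (List.foldl pvStep ([], PySem.Set.empty)) ?_)
  rw [List.map_append, List.map_map]
  refine congrArg₂ (· ++ ·) ?_ ?_
  · by_cases hr : pvGetA geo "road" ≠ "" <;>
      simp [hr, pvNorm_joinNonempty, pvW]
  · exact List.map_congr_left (fun ks _ => by
      simp only [Function.comp_apply, pvNorm_joinNonempty]; rfl)

-- if the filtered variant of a tuple is empty, so is the normalized one
theorem pvFilterA_eq (geo : List (String × String)) (ts : List (List String)) :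
    ((ts.filter
        (fun ks => decide (pvJoinNonemptyA (ks.map (pvGetA geo)) ≠ ""))).map
      (pvW geo)).filter (fun n => decide (n ≠ "")) =
      (ts.filter (fun ks => decide (pvW geo ks ≠ ""))).map (pvW geo) := by
  rw [List.filter_map, List.filter_filter]
  refine congrArg (List.map (pvW geo)) (List.filter_congr (fun ks _ => ?_))
  by_cases hj : pvJoinNonemptyA (ks.map (pvGetA geo)) = ""
  · have hw : pvW geo ks = "" := by
      rw [show pvW geo ks = pvNormStr (pvJoinNonemptyA (ks.map (pvGetA geo))) from
            (pvNorm_joinNonempty _).symm, hj]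
      exact pvNorm_empty
    simp [hj, hw]
  · simp [hj]

theorem location_variants_eq (geo : List (String × String)) :
    location_variants_py geo = location_variants_py_alt geo := by
  rw [pvA_eq, pvB_eq,
    pvFoldl_step_collapse _ ([], PySem.Set.empty) (fun x => by simp [PySem.Set.empty]),
    pvFoldl_stepN_filter, pvFoldl_stepN_filter, List.filter_append, pvFilterA_eq,
    List.filter_map]
  by_cases hr : pvGetA geo "road" = ""
  · -- empty road: the unified first tuple collapses to the second one
    have hw : pvW geo ["road", "neighborhood", "district", "city"] =
        pvW geo ["neighborhood", "district", "city"] := by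
      show pvN (pvGetA geo "road" :: _) = _
      rw [hr]
      exact pvN_empty_head _
    by_cases h2 : pvW geo ["neighborhood", "district", "city"] = ""
    · simp [hr, pvCombosB, pvTs4, List.filter_cons, hw, h2]
    · simp only [hr, ne_eq, not_true_eq_false, if_false,
        pvCombosB, pvTs4, List.filter_cons, hw, h2]
      simp [hw, h2, pvStep2N_idem]
  · simp only [pvCombosB, pvTs4, List.filter_cons]
    simp only [hr, ne_eq, not_false_eq_true, if_true, decide_not]
    by_cases h1 : pvW geo ["road", "neighborhood", "district", "city"] = "" <;>
      simp [h1]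

-- ===== VERDICT (by name: the statement is the Claim_ definition above) =====
theorem location_variants_py_spec : Claim_equal_location_variants_py := by
  intro geo _
  unfold Spec_location_variants_py
  exact location_variants_eq geo
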